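-- pv_equiv track=rewrite | github.com/marburyvthesea/post_cnmfe_analysis | dlc_utils.py | get_matched_threshold_crossings
-- ===== SOURCE A (Python) =====
-- def get_matched_threshold_crossings(input_array, threshold):
-- 	crossing_points = []
-- 	negative_crossings = []
-- 	for point in range(len(input_array)):
-- 		#look for where acceleration crosses threshold
-- 		if input_array[point]>threshold:
-- 			crossing_points.append(point)
-- 			#find point where acceleration crosses negative threshold again
-- 			i = point
-- 			crossed_neg_threshold=False
-- 			while i < (len(input_array)) and crossed_neg_threshold==False:
-- 				if input_array[i]<(threshold*-1):
-- 					negative_crossings.append(i+1)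
-- 					crossed_neg_threshold=True
-- 				i+=1
-- 	indicies_to_cut = list(zip(crossing_points, negative_crossings))
-- 	return(indicies_to_cut)
-- ===== SOURCE B (Python) =====
-- def get_matched_threshold_crossings(input_array, threshold):
--     # One backward pass: remember the nearest index at-or-after i whose value is
--     # below -threshold, so each positive crossing is matched in O(1).
--     result = []
--     next_neg = None
--     for i in range(len(input_array) - 1, -1, -1):
--         if input_array[i] < -threshold:
--             next_neg = i + 1
--         if input_array[i] > threshold and next_neg is not None:
--             result.append((i, next_neg))
--     result.reverse()
--     return result
-- ===== Notes on version B (the rewrite author's own statement) =====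
-- stated objective: faster
-- what changed: Replaces A's forward rescan of the whole tail for every positive crossing with a single backward pass that carries the nearest below-(-threshold) index, so each crossing is matched in O(1).
import Mathlib
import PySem

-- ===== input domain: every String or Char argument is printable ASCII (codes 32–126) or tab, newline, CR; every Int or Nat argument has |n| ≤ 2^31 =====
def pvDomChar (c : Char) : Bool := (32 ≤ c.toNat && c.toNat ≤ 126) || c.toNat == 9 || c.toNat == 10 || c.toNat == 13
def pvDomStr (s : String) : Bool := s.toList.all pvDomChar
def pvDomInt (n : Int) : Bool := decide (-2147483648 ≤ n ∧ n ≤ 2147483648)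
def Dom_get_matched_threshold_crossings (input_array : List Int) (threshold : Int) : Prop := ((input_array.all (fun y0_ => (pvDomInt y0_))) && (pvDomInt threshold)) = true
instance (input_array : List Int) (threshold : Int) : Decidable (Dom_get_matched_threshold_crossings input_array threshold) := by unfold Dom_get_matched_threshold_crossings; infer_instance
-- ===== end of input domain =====

-- B replaces A's per-crossing forward rescan by one backward pass that carries the
-- nearest below-(-threshold) index, making each match an O(1) lookup (objective: faster).

-- ===== PORT A =====
-- inner while loop of A: scan forward from i for the first value below threshold*-1
def whileA (input_array : List Int) (threshold : Int) (i : Nat) : Option Int :=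
  if h : i < input_array.length then
    if input_array.getD i 0 < threshold * -1 then some ((i : Int) + 1)
    else whileA input_array threshold (i + 1)
  else none
termination_by input_array.length - i

def get_matched_threshold_crossings (input_array : List Int) (threshold : Int) : List (Int × Int) :=
  let st := (List.range input_array.length).foldl
    (fun (st : List Int × List Int) point =>
      if input_array.getD point 0 > threshold then
        (st.1 ++ [(point : Int)],
         match whileA input_array threshold point with
         | some j => st.2 ++ [j]
         | none => st.2)
      else st) ([], [])
  st.1.zip st.2

-- ===== PORT B =====
-- backward pass of Source B as tail-first structural recursion: state = (next_neg, result)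
def altGo (threshold : Int) (off : Nat) : List Int → Option Int × List (Int × Int)
  | [] => (none, [])
  | x :: rest =>
    let st := altGo threshold (off + 1) rest
    let nxt := if x < -threshold then some ((off : Int) + 1) else st.1
    let acc := if x > threshold then
        match nxt with
        | some j => ((off : Int), j) :: st.2
        | none => st.2
      else st.2
    (nxt, acc)

def get_matched_threshold_crossings_alt (input_array : List Int) (threshold : Int) : List (Int × Int) :=
  (altGo threshold 0 input_array).2

-- ===== PRECONDITION & SPEC =====
def Spec_get_matched_threshold_crossings (input_array : List Int) (threshold : Int) (out : List (Int × Int)) : Prop := out = get_matched_threshold_crossings_alt input_array threshold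
instance (input_array : List Int) (threshold : Int) (out : List (Int × Int)) : Decidable (Spec_get_matched_threshold_crossings input_array threshold out) := by unfold Spec_get_matched_threshold_crossings; infer_instance

-- ===== CLAIM (what is proved, stated in full; the proofs are below) =====
def Claim_equal_get_matched_threshold_crossings : Prop := ∀ (input_array : List Int) (threshold : Int), Dom_get_matched_threshold_crossings input_array threshold → Spec_get_matched_threshold_crossings input_array threshold (get_matched_threshold_crossings input_array threshold)

-- ===== LEMMAS AND PROOFS =====

-- A's inner scan from i equals the carried "next negative" of B on the suffix from i
lemma whileA_eq (l : List Int) (thr : Int) (p : Nat) :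
    whileA l thr p = (altGo thr p (l.drop p)).1 := by
  induction p using whileA.induct (input_array := l) (threshold := thr) with
  | case1 p h hlt =>
    rw [whileA, List.drop_eq_getElem_cons h]
    simp only [altGo, List.getD_eq_getElem l 0 h] at *
    simp [dif_pos h, show l[p] < -thr by omega]
  | case2 p h hlt ih =>
    rw [whileA, List.drop_eq_getElem_cons h]
    simp only [altGo, List.getD_eq_getElem l 0 h] at *
    simp [dif_pos h, show ¬ l[p] < -thr by omega, ih]
  | case3 p h =>
    rw [whileA, List.drop_eq_nil_of_le (by omega)]
    simp [altGo, dif_neg h]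

-- B's carried option is none iff the suffix has no below-threshold value
lemma altGo_fst_none_iff (thr : Int) (l : List Int) (off : Nat) :
    (altGo thr off l).1 = none ↔ ∀ x ∈ l, ¬ x < -thr := by
  induction l generalizing off with
  | nil => simp [altGo]
  | cons x rest ih =>
    by_cases hx : x < -thr
    · simp [altGo, hx]
    · simp [altGo, hx, ih]
      omega

-- B's accumulated result as a filterMap over positions
lemma altGo_snd (thr : Int) (l : List Int) (off : Nat) :
    (altGo thr off l).2 = (List.range l.length).filterMap
      (fun k => if l.getD k 0 > thr then
          ((altGo thr (off + k) (l.drop k)).1).map (fun j => (((off + k : Nat) : Int), j))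
        else none) := by
  induction l generalizing off with
  | nil => simp [altGo]
  | cons x rest ih =>
    rw [List.length_cons, List.range_succ_eq_map, List.filterMap_cons, List.filterMap_map]
    have htail : (List.filterMap
        ((fun k => if (x :: rest).getD k 0 > thr then
            ((altGo thr (off + k) ((x :: rest).drop k)).1).map
              (fun j => (((off + k : Nat) : Int), j))
          else none) ∘ (fun k => k + 1)) (List.range rest.length))
        = (altGo thr (off + 1) rest).2 := by
      rw [ih (off + 1)]
      refine List.filterMap_congr (fun k _ => ?_)
      simp only [Function.comp]
      have h1 : (x :: rest).getD (k + 1) 0 = rest.getD k 0 := by simp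
      have h2 : (x :: rest).drop (k + 1) = rest.drop k := by simp
      have h3 : off + (k + 1) = (off + 1) + k := by omega
      rw [h1, h2, h3]
    rw [htail]
    show (altGo thr off (x :: rest)).2 = _
    simp only [altGo, List.getD_cons_zero, List.drop_zero, Nat.add_zero]
    by_cases hx : x > thr
    · by_cases hneg : x < -thr
      · simp [hx, hneg]
      · simp only [hx, hneg, if_true, if_false]
        cases hfst : (altGo thr (off + 1) rest).1 with
        | none => simp
        | some j => simp
    · simp only [hx, if_false]

-- A's foldl state as two filterMaps over the processed indices
lemma foldlA (l : List Int) (thr : Int) (n : Nat) :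
    (List.range n).foldl
      (fun (st : List Int × List Int) point =>
        if l.getD point 0 > thr then
          (st.1 ++ [(point : Int)],
           match whileA l thr point with
           | some j => st.2 ++ [j]
           | none => st.2)
        else st) ([], [])
    = ((List.range n).filterMap (fun p => if l.getD p 0 > thr then some ((p : Int)) else none),
       (List.range n).filterMap (fun p => if l.getD p 0 > thr then whileA l thr p else none)) := by
  induction n with
  | zero => simp
  | succ n ih =>
    rw [List.range_succ, List.foldl_append, List.filterMap_append, List.filterMap_append, ih]
    by_cases hc : l.getD n 0 > thr
    · cases hw : whileA l thr n with
      | none => simp [List.getD] at hc ⊢; simp [hc, hw]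
      | some j => simp [List.getD] at hc ⊢; simp [hc, hw]
    · simp [List.getD] at hc ⊢; simp [hc]

-- zipping the two filterMaps collapses to one filterMap when failures are upward-closed
lemma zip_filterMap_mono (g : Nat → Option Int)
    (mono : ∀ p q : Nat, p ≤ q → g p = none → g q = none)
    (P : Nat → Prop) [DecidablePred P] :
    ∀ xs : List Nat, List.Pairwise (· ≤ ·) xs →
      ((xs.filterMap (fun p => if P p then some ((p : Int)) else none)).zip
       (xs.filterMap (fun p => if P p then g p else none)))
      = xs.filterMap (fun p => if P p then (g p).map (fun j => ((p : Int), j)) else none) := by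
  intro xs hpw
  induction xs with
  | nil => simp
  | cons x tl ih =>
    have hx_le : ∀ y ∈ tl, x ≤ y := fun y hy => (List.pairwise_cons.mp hpw).1 y hy
    have htl := ih (List.pairwise_cons.mp hpw).2
    by_cases hP : P x
    · cases hg : g x with
      | some j =>
        simp only [List.filterMap_cons, hP, if_true, hg, Option.map_some]
        simpa [List.zip_cons_cons] using htl
      | none =>
        have hnone : ∀ y ∈ tl, (if P y then g y else none) = none := by
          intro y hy
          by_cases hPy : P y
          · simp [hPy, mono x y (hx_le y hy) hg]
          · simp [hPy]
        have hnil : tl.filterMap (fun p => if P p then g p else none) = [] :=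
          List.filterMap_eq_nil_iff.mpr hnone
        have hnil2 : tl.filterMap
            (fun p => if P p then (g p).map (fun j => ((p : Int), j)) else none) = [] := by
          refine List.filterMap_eq_nil_iff.mpr (fun y hy => ?_)
          by_cases hPy : P y
          · simp [hPy, mono x y (hx_le y hy) hg]
          · simp [hPy]
        simp [hP, hg, hnil, hnil2]
    · simp only [List.filterMap_cons, hP, if_false]
      exact htl

-- ===== VERDICT (by name: the statement is the Claim_ definition above) =====
theorem get_matched_threshold_crossings_spec : Claim_equal_get_matched_threshold_crossings := by
  intro l thr _
  unfold Spec_get_matched_threshold_crossings get_matched_threshold_crossings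
    get_matched_threshold_crossings_alt
  have mono : ∀ p q : Nat, p ≤ q → whileA l thr p = none → whileA l thr q = none := by
    intro p q hpq h
    rw [whileA_eq] at h ⊢
    rw [altGo_fst_none_iff] at h ⊢
    intro x hx
    have hsub : l.drop q = (l.drop p).drop (q - p) := by
      rw [List.drop_drop]; congr 1; omega
    exact h x (List.mem_of_mem_drop (hsub ▸ hx))
  have hpw : (List.range l.length).Pairwise (fun a b : Nat => a ≤ b) :=
    (List.pairwise_lt_range).imp (fun h => le_of_lt h)
  rw [foldlA l thr l.length]
  rw [zip_filterMap_mono (fun p => whileA l thr p) mono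
      (fun p => l.getD p 0 > thr) (List.range l.length) hpw]
  rw [altGo_snd thr l 0]
  refine List.filterMap_congr (fun k hk => ?_)
  simp [whileA_eq]
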